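-- pv_equiv track=rewrite | github.com/pypi-data/pypi-mirror-401 | packages/tenets/tenets-0.10.0.tar.gz/tenets-0.10.0/tenets/core/summarizer/summarizer_utils.py | extract_leading_comments
-- ===== SOURCE A (Python) =====
-- def extract_leading_comments(text: str, max_lines: int = 10) -> str:
--     """Extract leading comments from code.
--
--     Args:
--         text: Source code text
--         max_lines: Maximum lines to check
--
--     Returns:
--         Extracted comments
--     """
--     comments = []
--     lines = text.split("\n")[:max_lines]
--
--     for line in lines:
--         stripped = line.strip()
--         if stripped.startswith("#"):
--             comments.append(stripped)
--         elif stripped.startswith(('"""', "'''")):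
--             # Start of docstring
--             docstring_lines = []
--             in_docstring = True
--             quote = stripped[:3]
--
--             for rest_line in lines[lines.index(line) :]:
--                 docstring_lines.append(rest_line)
--                 if rest_line.strip().endswith(quote) and len(docstring_lines) > 1:
--                     break
--
--             comments.extend(docstring_lines)
--             break
--         elif stripped and not stripped.startswith(("import ", "from ")):
--             # Hit actual code
--             break
--
--     return "\n".join(comments)
-- ===== SOURCE B (Python) =====
-- def extract_leading_comments(text: str, max_lines: int = 10) -> str:
--     """Single forward pass with an in_docstring state; no re-scan via lines.index."""
--     lines = text.split("\n")[:max_lines]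
--     comments = []
--     in_docstring = False
--     quote = ""
--     count = 0
--     for line in lines:
--         if in_docstring:
--             comments.append(line)
--             count += 1
--             if line.strip().endswith(quote) and count > 1:
--                 break
--         else:
--             stripped = line.strip()
--             if stripped.startswith("#"):
--                 comments.append(stripped)
--             elif stripped.startswith(('"""', "'''")):
--                 in_docstring = True
--                 quote = stripped[:3]
--                 count = 1
--                 comments.append(line)
--             elif stripped and not stripped.startswith(("import ", "from ")):
--                 break
--     return "\n".join(comments)
-- ===== Notes on version B (the rewrite author's own statement) =====
-- stated objective: simpler
-- what changed: Replaced A's nested docstring handling (re-locating the current line with lines.index and re-scanning lines[i:] in an inner loop) by a single forward pass that carries an in_docstring/quote/count state, so the inner scan and the index lookup disappear.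
import Mathlib
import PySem

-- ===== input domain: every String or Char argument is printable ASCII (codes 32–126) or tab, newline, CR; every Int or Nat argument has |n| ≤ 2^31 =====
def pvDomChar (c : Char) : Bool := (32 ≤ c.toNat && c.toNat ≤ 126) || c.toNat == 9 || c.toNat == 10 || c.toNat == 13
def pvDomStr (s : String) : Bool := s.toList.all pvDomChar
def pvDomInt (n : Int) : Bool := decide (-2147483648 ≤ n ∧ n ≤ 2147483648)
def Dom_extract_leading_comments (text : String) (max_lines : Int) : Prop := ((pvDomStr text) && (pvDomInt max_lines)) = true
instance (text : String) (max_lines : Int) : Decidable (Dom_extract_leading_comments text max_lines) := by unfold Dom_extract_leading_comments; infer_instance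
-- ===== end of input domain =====

-- B replaces A's nested docstring re-scan (lines.index + a second loop over lines[i:]) by one forward
-- pass with an in_docstring/quote/count state; objective: simpler (one pass, no inner scan).

-- ===== PORT A =====
-- inner loop: 'for rest_line in lines[lines.index(line):]' accumulating docstring_lines
def pvAInner (quote : String) : List String → List String → List String
  | acc, [] => acc
  | acc, l :: ls =>
    let acc' := acc ++ [l]
    if PySem.Str.endswith (PySem.Str.strip l) quote && decide (acc'.length > 1) then acc'
    else pvAInner quote acc' ls

-- outer loop of A over `rest`, a suffix of `lines`; `comments` is the accumulator
def pvALoop (lines : List String) : List String → List String → List String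
  | comments, [] => comments
  | comments, line :: rest =>
    let stripped := PySem.Str.strip line
    if PySem.Str.startswith stripped "#" then
      pvALoop lines (comments ++ [stripped]) rest
    else if PySem.Str.startswith stripped "\"\"\"" || PySem.Str.startswith stripped "'''" then
      let quote := PySem.Str.slice stripped none (some 3)
      -- lines.index(line): always found since line ∈ lines at every call site (ValueError unreachable)
      let tail := match PySem.List.index? lines line with
        | some i => PySem.List.slice lines (some (i : Int)) none
        | none => []
      comments ++ pvAInner quote [] tail
    else if !(stripped == "") && !(PySem.Str.startswith stripped "import " || PySem.Str.startswith stripped "from ") then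
      comments
    else
      pvALoop lines comments rest

def extract_leading_comments (text : String) (max_lines : Int) : String :=
  let lines := PySem.List.slice ((PySem.Str.split? text "\n").getD []) none (some max_lines)
  PySem.Str.join "\n" (pvALoop lines [] lines)

-- ===== PORT B =====
-- single pass; state = (in_docstring, quote, count, comments)
def pvBGo : Bool → String → Nat → List String → List String → List String
  | _, _, _, comments, [] => comments
  | inDoc, quote, count, comments, line :: rest =>
    if inDoc then
      let comments' := comments ++ [line]
      let count' := count + 1
      if PySem.Str.endswith (PySem.Str.strip line) quote && decide (count' > 1) then comments'
      else pvBGo true quote count' comments' rest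
    else
      let stripped := PySem.Str.strip line
      if PySem.Str.startswith stripped "#" then
        pvBGo false quote count (comments ++ [stripped]) rest
      else if PySem.Str.startswith stripped "\"\"\"" || PySem.Str.startswith stripped "'''" then
        pvBGo true (PySem.Str.slice stripped none (some 3)) 1 (comments ++ [line]) rest
      else if !(stripped == "") && !(PySem.Str.startswith stripped "import " || PySem.Str.startswith stripped "from ") then
        comments
      else
        pvBGo false quote count comments rest

def extract_leading_comments_alt (text : String) (max_lines : Int) : String :=
  let lines := PySem.List.slice ((PySem.Str.split? text "\n").getD []) none (some max_lines)
  PySem.Str.join "\n" (pvBGo false "" 0 [] lines)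

-- ===== PRECONDITION & SPEC =====
def Spec_extract_leading_comments (text : String) (max_lines : Int) (out : String) : Prop := out = extract_leading_comments_alt text max_lines
instance (text : String) (max_lines : Int) (out : String) : Decidable (Spec_extract_leading_comments text max_lines out) := by unfold Spec_extract_leading_comments; infer_instance

-- ===== CLAIM (what is proved, stated in full; the proofs are below) =====
def Claim_equal_extract_leading_comments : Prop := ∀ (text : String) (max_lines : Int), Dom_extract_leading_comments text max_lines → Spec_extract_leading_comments text max_lines (extract_leading_comments text max_lines)

-- ===== LEMMAS AND PROOFS =====

-- lines A's outer loop skips over without breaking: '#'-comments, blank, import/from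
def pvSkip (l : String) : Prop :=
  PySem.Str.startswith (PySem.Str.strip l) "#" = true ∨ PySem.Str.strip l = "" ∨
  PySem.Str.startswith (PySem.Str.strip l) "import " = true ∨ PySem.Str.startswith (PySem.Str.strip l) "from " = true

lemma prefix_head {c : Char} {p t : List Char} (h : (c :: p) <+: t) : t.head? = some c := by
  obtain ⟨u, rfl⟩ := h; rfl

-- a skipped line never begins (after strip) with a triple quote, so a docstring-opening line
-- cannot occur among the already-skipped prefix
lemma pvSkip_ne_doc {l line : String} (hS : pvSkip l)
    (hq : PySem.Str.startswith (PySem.Str.strip line) "\"\"\"" = true ∨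
          PySem.Str.startswith (PySem.Str.strip line) "'''" = true) : line ≠ l := by
  intro rfl
  have hhd : (PySem.Str.strip line).toList.head? = some '"' ∨ (PySem.Str.strip line).toList.head? = some '\'' := by
    rcases hq with h | h
    · exact Or.inl (prefix_head ((PySem.Chars.startswith_iff _ _).mp (by simpa using h)))
    · exact Or.inr (prefix_head ((PySem.Chars.startswith_iff _ _).mp (by simpa using h)))
  rcases hS with h | h | h | h
  · have := prefix_head ((PySem.Chars.startswith_iff _ _).mp (by simpa using h))
    rcases hhd with h' | h' <;> simp_all
  · rw [h] at hhd; simp at hhd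
  · have := prefix_head ((PySem.Chars.startswith_iff _ _).mp (by simpa using h))
    rcases hhd with h' | h' <;> simp_all
  · have := prefix_head ((PySem.Chars.startswith_iff _ _).mp (by simpa using h))
    rcases hhd with h' | h' <;> simp_all

-- A's inner docstring loop = B's in_docstring state, once the opening line is in the accumulator
lemma inner_eq (quote : String) : ∀ (ls acc comments : List String) (count : Nat),
    count = acc.length → 1 ≤ count →
    comments ++ pvAInner quote acc ls = pvBGo true quote count (comments ++ acc) ls := by
  intro ls
  induction ls with
  | nil => intro acc comments count hc h1; simp [pvAInner, pvBGo]
  | cons l ls ih =>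
    intro acc comments count hc h1
    simp only [pvAInner, pvBGo, if_pos]
    have hgt : (decide ((acc ++ [l]).length > 1)) = true := by
      simp only [List.length_append, List.length_cons, decide_eq_true_eq]; omega
    have hgt' : (decide (count + 1 > 1)) = true := by
      simp only [decide_eq_true_eq]; omega
    rw [hgt, hgt']
    simp only [Bool.and_true]
    by_cases he : PySem.Str.endswith (PySem.Str.strip l) quote = true
    · rw [if_pos he, if_pos he]
      simp
    · rw [if_neg he, if_neg he]
      have := ih (acc ++ [l]) comments (count + 1) (by simp [hc]) (by omega)
      simpa using this

-- A's outer loop on a suffix of `lines` whose already-skipped prefix satisfies pvSkip = B's loop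
lemma loop_eq (lines : List String) : ∀ (rest pre comments : List String) (q : String) (c : Nat),
    lines = pre ++ rest → (∀ l ∈ pre, pvSkip l) →
    pvALoop lines comments rest = pvBGo false q c comments rest := by
  intro rest
  induction rest with
  | nil => intro pre comments q c _ _; simp [pvALoop, pvBGo]
  | cons line rest ih =>
    intro pre comments q c hsplit hskip
    simp only [pvALoop, pvBGo, Bool.false_eq_true, if_false]
    by_cases h1 : PySem.Str.startswith (PySem.Str.strip line) "#" = true
    · rw [if_pos h1, if_pos h1]
      exact ih (pre ++ [line]) (comments ++ [PySem.Str.strip line]) q c (by simp [hsplit])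
        (by intro l hl
            rcases List.mem_append.mp hl with h | h
            · exact hskip l h
            · simp only [List.mem_singleton] at h; subst h; exact Or.inl h1)
    · rw [if_neg h1, if_neg h1]
      by_cases h2 : (PySem.Str.startswith (PySem.Str.strip line) "\"\"\"" ||
                     PySem.Str.startswith (PySem.Str.strip line) "'''") = true
      · rw [if_pos h2, if_pos h2]
        have hq := (Bool.or_eq_true _ _).mp h2
        have hnotmem : line ∉ pre := fun hmem => (pvSkip_ne_doc (hskip line hmem) hq) rfl
        have hidx : PySem.List.index? lines line = some pre.length :=
          (PySem.List.index?_eq_some_iff lines line pre.length).mpr ⟨pre, rest, hsplit, rfl, hnotmem⟩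
        rw [hidx]
        have hslice : PySem.List.slice lines (some ((pre.length : Nat) : Int)) none = line :: rest := by
          rw [PySem.List.slice_from_natCast, hsplit, List.drop_left]
        simp only [hslice]
        -- unfold one step of pvAInner on the opening line: the `len > 1` test is false there
        have hstep : ∀ qt : String, pvAInner qt [] (line :: rest) = pvAInner qt [line] rest := by
          intro qt
          simp [pvAInner]
        rw [hstep]
        have := inner_eq (PySem.Str.slice (PySem.Str.strip line) none (some 3)) rest [line] comments 1 rfl le_rfl
        simpa using this
      · rw [if_neg h2, if_neg h2]
        by_cases h3 : (!(PySem.Str.strip line == "") &&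
            !(PySem.Str.startswith (PySem.Str.strip line) "import " || PySem.Str.startswith (PySem.Str.strip line) "from ")) = true
        · rw [if_pos h3, if_pos h3]
        · rw [if_neg h3, if_neg h3]
          refine ih (pre ++ [line]) comments q c (by simp [hsplit]) ?_
          intro l hl
          rcases List.mem_append.mp hl with h | h
          · exact hskip l h
          · simp only [List.mem_singleton] at h; subst h
            unfold pvSkip
            by_cases hi : PySem.Str.startswith (PySem.Str.strip l) "import " = true
            · exact Or.inr (Or.inr (Or.inl hi))
            by_cases hf : PySem.Str.startswith (PySem.Str.strip l) "from " = true
            · exact Or.inr (Or.inr (Or.inr hf))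
            refine Or.inr (Or.inl ?_)
            by_contra hne
            simp only [Bool.not_eq_true] at hi hf
            simp at hi hf
            exact h3 (by simp [hne, hi, hf])

theorem extract_leading_comments_spec : Claim_equal_extract_leading_comments := by
  intro text max_lines _
  unfold Spec_extract_leading_comments extract_leading_comments extract_leading_comments_alt
  exact congrArg (PySem.Str.join "\n")
    (loop_eq (PySem.List.slice ((PySem.Str.split? text "\n").getD []) none (some max_lines))
      (PySem.List.slice ((PySem.Str.split? text "\n").getD []) none (some max_lines)) [] [] "" 0 rfl
      (by simp))
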